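-- pv_equiv track=rewrite | github.com/jinwooseok/coding-test | programmers/no_review/아이템줍기.py | solution
-- ===== SOURCE A (Python) =====
-- def solution(a):
--     answer = 0
--     left_min = [10**10]*len(a)
--     right_min = [10**10]*len(a)
--     left_min[0] = a[0]
--     right_min[-1] = a[-1]
--     for i in range(1,len(a)):
--         left_min[i] = min(left_min[i-1],a[i])
--
--     for i in range(len(a)-2,-1,-1):
--         right_min[i] = min(right_min[i+1], a[i])
--
--     for i in range(len(a)):
--         if a[i]>left_min[i] and a[i]>right_min[i]:
--             continue
--         else:
--             answer+=1
--     return answer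
-- ===== SOURCE B (Python) =====
-- def solution(a):
--     # inclusion-exclusion: prefix-min records + suffix-min records - occurrences of the global minimum
--     run = a[0]
--     pre = 0
--     for x in a:
--         if x <= run:
--             pre += 1
--             run = x
--     run = a[-1]
--     suf = 0
--     for x in reversed(a):
--         if x <= run:
--             suf += 1
--             run = x
--     return pre + suf - a.count(min(a))
-- ===== Notes on version B (the rewrite author's own statement) =====
-- stated objective: faster
-- what changed: A builds two full prefix-/suffix-minimum arrays with index loops and then scans them; B never materialises arrays: it counts prefix-min records in one forward pass and suffix-min records in one backward pass with a running minimum, and returns prefix_count + suffix_count - count(min(a)) by inclusion-exclusion (a position is both kinds of record iff its value is the global minimum), in O(1) extra space.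
import Mathlib
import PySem

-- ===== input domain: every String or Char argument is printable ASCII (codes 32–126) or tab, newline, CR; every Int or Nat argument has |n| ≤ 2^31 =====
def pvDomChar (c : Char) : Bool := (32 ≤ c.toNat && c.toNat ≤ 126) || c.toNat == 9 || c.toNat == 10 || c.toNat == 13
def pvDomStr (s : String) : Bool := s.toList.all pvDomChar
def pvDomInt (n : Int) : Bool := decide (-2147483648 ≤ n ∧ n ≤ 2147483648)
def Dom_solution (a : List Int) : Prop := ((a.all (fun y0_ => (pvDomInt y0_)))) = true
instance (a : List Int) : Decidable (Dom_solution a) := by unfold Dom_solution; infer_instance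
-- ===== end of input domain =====

-- B replaces A's two scratch arrays and three index loops by inclusion-exclusion over two
-- running-minimum passes plus a count of the global minimum (alternative decomposition, O(1) extra space).


-- ===== PORT A =====
def solution (a : List Int) : Int :=
  let n : Int := PySem.List.len a
  let left0 : List Int := PySem.List.pyRepeat [(10:Int)^10] n
  let right0 : List Int := PySem.List.pyRepeat [(10:Int)^10] n
  let left1 := PySem.List.pySetD left0 0 (PySem.List.pyGetD a 0 0)
  let right1 := PySem.List.pySetD right0 (-1) (PySem.List.pyGetD a (-1) 0)
  let left := (PySem.List.pyRange 1 n 1).foldl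
      (fun L i => PySem.List.pySetD L i (min (PySem.List.pyGetD L (i-1) 0) (PySem.List.pyGetD a i 0))) left1
  let right := (PySem.List.pyRange (n-2) (-1) (-1)).foldl
      (fun R i => PySem.List.pySetD R i (min (PySem.List.pyGetD R (i+1) 0) (PySem.List.pyGetD a i 0))) right1
  (PySem.List.pyRange 0 n 1).foldl
      (fun ans i => if PySem.List.pyGetD a i 0 > PySem.List.pyGetD left i 0 ∧
                       PySem.List.pyGetD a i 0 > PySem.List.pyGetD right i 0
                    then ans else ans + 1) 0

-- ===== PORT B =====
-- the running-minimum record-counting pass of Source B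
def recordsB : Int → List Int → Int
  | _, [] => 0
  | run, x :: xs => if x ≤ run then 1 + recordsB x xs else recordsB run xs

def solution_alt (a : List Int) : Int :=
  let pre := recordsB (PySem.List.pyGetD a 0 0) a
  let suf := recordsB (PySem.List.pyGetD a (-1) 0) a.reverse
  pre + suf - (PySem.List.count a ((PySem.List.min? a (fun x => x)).getD 0) : Int)

-- ===== PRECONDITION & SPEC =====
-- A raises IndexError on the empty list (a[0]); Pre_ excludes exactly that input.
def Pre_solution (a : List Int) : Prop := a ≠ []
instance (a : List Int) : Decidable (Pre_solution a) := by unfold Pre_solution; infer_instance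
def pvWitness_solution : List Int := [3, 1, 2]

def Spec_solution (a : List Int) (out : Int) : Prop := out = solution_alt a
instance (a : List Int) (out : Int) : Decidable (Spec_solution a out) := by unfold Spec_solution; infer_instance

-- ===== CLAIM (what is proved, stated in full; the proofs are below) =====
def Claim_equal_solution : Prop := ∀ (a : List Int), Dom_solution a → Pre_solution a → Spec_solution a (solution a)

-- ===== LEMMAS AND PROOFS =====

/-- List of running minima: entry j is the minimum of `m` and the first `j+1` elements. -/
def scanMin : Int → List Int → List Int
  | _, [] => []
  | m, x :: xs => min m x :: scanMin (min m x) xs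

theorem scanMin_getD_succ (m : Int) (l : List Int) (j : Nat) (hj : j + 1 < l.length) :
    (scanMin m l).getD (j+1) 0 = min ((scanMin m l).getD j 0) (l.getD (j+1) 0) := by
  induction l generalizing m j with
  | nil => simp at hj
  | cons x xs ih =>
      cases j with
      | zero =>
          cases xs with
          | nil => simp at hj
          | cons y ys => simp [scanMin]
      | succ k =>
          simp only [scanMin, List.getD_cons_succ, List.length_cons] at *
          exact ih (min m x) k (by omega)

theorem scanMin_getD_le_init (m : Int) (l : List Int) (j : Nat) (hj : j < l.length) :
    (scanMin m l).getD j 0 ≤ m := by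
  induction l generalizing m j with
  | nil => simp at hj
  | cons x xs ih =>
      cases j with
      | zero => simp [scanMin]
      | succ k =>
          simp only [scanMin, List.getD_cons_succ]
          calc (scanMin (min m x) xs).getD k 0 ≤ min m x := ih (min m x) k (by simpa using hj)
            _ ≤ m := min_le_left _ _

theorem scanMin_getD_le_elem (m : Int) (l : List Int) (j k : Nat) (hk : k ≤ j) (hj : j < l.length) :
    (scanMin m l).getD j 0 ≤ l.getD k 0 := by
  induction l generalizing m j k with
  | nil => simp at hj
  | cons x xs ih =>
      cases k with
      | zero =>
          simp only [List.getD_cons_zero]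
          cases j with
          | zero => simp [scanMin]
          | succ j' =>
              simp only [scanMin, List.getD_cons_succ]
              calc (scanMin (min m x) xs).getD j' 0 ≤ min m x :=
                    scanMin_getD_le_init _ _ _ (by simpa using hj)
                _ ≤ x := min_le_right _ _
      | succ k' =>
          cases j with
          | zero => omega
          | succ j' =>
              simp only [scanMin, List.getD_cons_succ]
              exact ih (min m x) j' k' (by omega) (by simpa using hj)

theorem scanMin_getD_mem (m : Int) (l : List Int) (j : Nat) (hj : j < l.length) :
    (scanMin m l).getD j 0 = m ∨ (scanMin m l).getD j 0 ∈ l := by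
  induction l generalizing m j with
  | nil => simp at hj
  | cons x xs ih =>
      cases j with
      | zero =>
          simp only [scanMin, List.getD_cons_zero]
          rcases le_total m x with h | h
          · left; simp [min_eq_left h]
          · right; simp [min_eq_right h]
      | succ k =>
          simp only [scanMin, List.getD_cons_succ]
          rcases ih (min m x) k (by simpa using hj) with h | h
          · rcases le_total m x with h2 | h2
            · left; rw [h, min_eq_left h2]
            · right; rw [h, min_eq_right h2]; simp
          · exact .inr (List.mem_cons_of_mem x h)

theorem scanMin_getD_zero_self (a : List Int) (ha : a ≠ []) :
    (scanMin (a.getD 0 0) a).getD 0 0 = a.getD 0 0 := by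
  obtain ⟨x, xs, rfl⟩ := List.exists_cons_of_ne_nil ha
  simp [scanMin]

/-- B's record pass counts the indices whose element is ≤ the running minimum so far. -/
theorem records_eq_countP (l : List Int) (m : Int) :
    recordsB m l =
      ((List.range l.length).countP (fun j => decide (l.getD j 0 ≤ (scanMin m l).getD j 0)) : Int) := by
  induction l generalizing m with
  | nil => rfl
  | cons x xs ih =>
      rw [List.length_cons, List.range_succ_eq_map, List.countP_cons, List.countP_map]
      have hmap : List.countP ((fun j => decide ((x :: xs).getD j 0 ≤ (scanMin m (x :: xs)).getD j 0)) ∘ Nat.succ)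
            (List.range xs.length)
          = List.countP (fun j => decide (xs.getD j 0 ≤ (scanMin (min m x) xs).getD j 0)) (List.range xs.length) := by
        apply List.countP_congr; intro y _; simp [scanMin]
      rw [hmap]
      simp only [List.getD_cons_zero, scanMin, List.getD_cons_zero]
      by_cases h : x ≤ m
      · have h1 : min m x = x := min_eq_right h
        rw [recordsB, if_pos h, h1, ih x]
        simp
        ring
      · have h1 : min m x = m := min_eq_left (by omega)
        rw [recordsB, if_neg h, h1, ih m]
        rw [if_neg (by simpa using h)]
        simp

theorem countP_or_and {β : Type} (l : List β) (p q : β → Bool) :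
    l.countP (fun x => p x || q x) + l.countP (fun x => p x && q x) = l.countP p + l.countP q := by
  induction l with
  | nil => rfl
  | cons x xs ih =>
      by_cases hp : p x <;> by_cases hq : q x <;>
        simp [hp, hq] <;> omega

theorem range_reverse_map (n : Nat) :
    (List.range n).reverse = (List.range n).map (fun j => n - 1 - j) := by
  apply List.ext_getElem
  · simp
  · intro k h1 h2
    simp at h1 ⊢
    try omega

theorem countP_range_reflect (n : Nat) (p : Nat → Bool) :
    (List.range n).countP (fun j => p (n - 1 - j)) = (List.range n).countP p := by
  conv_rhs => rw [← (List.reverse_perm (List.range n)).countP_eq, range_reverse_map]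
  rw [List.countP_map]
  rfl

theorem countP_range_getD {α : Type} (l : List α) (p : α → Bool) (d : α) :
    (List.range l.length).countP (fun j => p (l.getD j d)) = l.countP p := by
  induction l with
  | nil => rfl
  | cons x xs ih =>
      rw [List.length_cons, List.range_succ_eq_map, List.countP_cons, List.countP_cons,
        List.countP_map]
      simp only [List.getD_cons_zero]
      have : List.countP ((fun j => p ((x :: xs).getD j d)) ∘ Nat.succ) (List.range xs.length)
          = List.countP (fun j => p (xs.getD j d)) (List.range xs.length) := by
        apply List.countP_congr; intro y _; simp
      rw [this, ih]

theorem pySetD_neg_one {α : Type} (xs : List α) (h : xs ≠ []) (v : α) :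
    PySem.List.pySetD xs (-1) v = xs.set (xs.length - 1) v := by
  have hn : 0 < xs.length := List.length_pos_iff.mpr h
  rw [PySem.List.pySetD, PySem.List.pySet?, PySem.List.pyIdx?]
  rw [if_neg (by omega), if_pos (by omega)]
  simp

theorem count_if_fold' {β : Type} (P : β → Prop) [DecidablePred P] (l : List β) (z : Int) :
    l.foldl (fun ans j => if P j then ans else ans + 1) z
      = z + (l.countP (fun j => !(decide (P j))) : Int) := by
  induction l generalizing z with
  | nil => simp
  | cons x xs ih =>
      by_cases h : P x <;> simp [h, ih, add_assoc, add_comm]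

theorem reverse_getD (a : List Int) (j : Nat) (hj : j < a.length) :
    a.reverse.getD j 0 = a.getD (a.length - 1 - j) 0 := by
  rw [List.getD_eq_getElem _ _ (by simpa using hj), List.getD_eq_getElem _ _ (by omega),
    List.getElem_reverse]

theorem leftAux (a : List Int) (ha : a ≠ []) :
    ∀ (m : Nat), m ≤ a.length - 1 →
      ((List.range m).foldl
          (fun (L : List Int) (k : Nat) => PySem.List.pySetD L (1 + (k:Int))
            (min (PySem.List.pyGetD L (1 + (k:Int) - 1) 0) (PySem.List.pyGetD a (1 + (k:Int)) 0)))
          ((List.replicate a.length ((10:Int)^10)).set 0 (a.getD 0 0))).length = a.length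
      ∧ ∀ j < a.length,
        ((List.range m).foldl
          (fun (L : List Int) (k : Nat) => PySem.List.pySetD L (1 + (k:Int))
            (min (PySem.List.pyGetD L (1 + (k:Int) - 1) 0) (PySem.List.pyGetD a (1 + (k:Int)) 0)))
          ((List.replicate a.length ((10:Int)^10)).set 0 (a.getD 0 0))).getD j 0
        = if j ≤ m then (scanMin (a.getD 0 0) a).getD j 0 else (10:Int)^10 := by
  have hn : 0 < a.length := List.length_pos_iff.mpr ha
  intro m
  induction m with
  | zero =>
      intro _
      simp only [List.range_zero, List.foldl_nil]
      constructor
      · simp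
      · intro j hj
        rcases Nat.eq_zero_or_pos j with rfl | hjp
        · rw [if_pos (le_refl 0), scanMin_getD_zero_self a ha,
            List.getD_eq_getElem _ _ (by simpa using hj), List.getElem_set]
          simp
        · rw [if_neg (by omega), List.getD_eq_getElem _ _ (by simpa using hj),
            List.getElem_set, if_neg (by omega)]
          simp
  | succ m ih =>
      intro hm
      obtain ⟨ihlen, ihval⟩ := ih (by omega)
      rw [List.range_succ, List.foldl_append, List.foldl_cons, List.foldl_nil]
      have e1 : (1:Int) + (m:Int) - 1 = ((m:Nat):Int) := by omega
      have e2 : (1:Int) + (m:Int) = (((m+1):Nat):Int) := by omega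
      rw [e1, e2, PySem.List.pySetD_natCast, PySem.List.pyGetD_natCast, PySem.List.pyGetD_natCast]
      have hval : min ((((List.range m).foldl
          (fun (L : List Int) (k : Nat) => PySem.List.pySetD L (1 + (k:Int))
            (min (PySem.List.pyGetD L (1 + (k:Int) - 1) 0) (PySem.List.pyGetD a (1 + (k:Int)) 0)))
          ((List.replicate a.length ((10:Int)^10)).set 0 (a.getD 0 0)))).getD m 0) (a.getD (m+1) 0)
          = (scanMin (a.getD 0 0) a).getD (m+1) 0 := by
        rw [ihval m (by omega), if_pos (le_refl m), ← scanMin_getD_succ _ _ _ (by omega)]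
      rw [hval]
      constructor
      · simpa using ihlen
      · intro j hj
        rw [List.getD_eq_getElem _ _ (by rw [List.length_set, ihlen]; omega), List.getElem_set]
        by_cases hje : m + 1 = j
        · rw [if_pos hje, if_pos (by omega), hje]
        · rw [if_neg hje, ← List.getD_eq_getElem _ 0 (by rw [ihlen]; omega), ihval j hj]
          by_cases hjm : j ≤ m
          · rw [if_pos hjm, if_pos (by omega)]
          · rw [if_neg hjm, if_neg (by omega)]

theorem leftFold_getD (a : List Int) (ha : a ≠ []) (j : Nat) (hj : j < a.length) :
    ((PySem.List.pyRange 1 (PySem.List.len a) 1).foldl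
        (fun L i => PySem.List.pySetD L i (min (PySem.List.pyGetD L (i-1) 0) (PySem.List.pyGetD a i 0)))
        (PySem.List.pySetD (PySem.List.pyRepeat [(10:Int)^10] (PySem.List.len a)) 0 (PySem.List.pyGetD a 0 0))).getD j 0
      = (scanMin (a.getD 0 0) a).getD j 0 := by
  have hn : 0 < a.length := List.length_pos_iff.mpr ha
  rw [PySem.List.len_eq, PySem.List.pyRange_one]
  have ht : ((a.length : Int) - 1).toNat = a.length - 1 := by omega
  rw [ht, List.foldl_map, PySem.List.pyRepeat_singleton,
    PySem.List.pySetD_of_nonneg _ _ (by norm_num : (0:Int) ≤ 0), PySem.List.pyGetD_zero]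
  simp only [Int.toNat_natCast, Int.toNat_zero]
  obtain ⟨_, hval⟩ := leftAux a ha (a.length - 1) (le_refl _)
  have h2 := hval j hj
  rw [if_pos (by omega)] at h2
  exact h2

theorem rightAux (a : List Int) (ha : a ≠ []) :
    ∀ (m : Nat), m ≤ a.length - 1 →
      ((List.range m).foldl
          (fun (R : List Int) (k : Nat) => PySem.List.pySetD R ((a.length:Int) - 2 - (k:Int))
            (min (PySem.List.pyGetD R ((a.length:Int) - 2 - (k:Int) + 1) 0)
                 (PySem.List.pyGetD a ((a.length:Int) - 2 - (k:Int)) 0)))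
          ((List.replicate a.length ((10:Int)^10)).set (a.length - 1) (a.getD (a.length - 1) 0))).length = a.length
      ∧ ∀ j < a.length,
        ((List.range m).foldl
          (fun (R : List Int) (k : Nat) => PySem.List.pySetD R ((a.length:Int) - 2 - (k:Int))
            (min (PySem.List.pyGetD R ((a.length:Int) - 2 - (k:Int) + 1) 0)
                 (PySem.List.pyGetD a ((a.length:Int) - 2 - (k:Int)) 0)))
          ((List.replicate a.length ((10:Int)^10)).set (a.length - 1) (a.getD (a.length - 1) 0))).getD j 0
        = if a.length - 1 - m ≤ j then (scanMin (a.getD (a.length - 1) 0) a.reverse).getD (a.length - 1 - j) 0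
          else (10:Int)^10 := by
  have hn : 0 < a.length := List.length_pos_iff.mpr ha
  have hrevne : a.reverse ≠ [] := by simpa using ha
  have hq0 : (scanMin (a.getD (a.length - 1) 0) a.reverse).getD 0 0 = a.getD (a.length - 1) 0 := by
    have h1 : a.getD (a.length - 1) 0 = a.reverse.getD 0 0 := by
      rw [reverse_getD a 0 hn]; simp
    rw [h1, scanMin_getD_zero_self a.reverse hrevne]
  intro m
  induction m with
  | zero =>
      intro _
      simp only [List.range_zero, List.foldl_nil]
      constructor
      · simp
      · intro j hj
        by_cases hje : a.length - 1 ≤ j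
        · have hj1 : j = a.length - 1 := by omega
          rw [if_pos (by omega), List.getD_eq_getElem _ _ (by simpa using hj), List.getElem_set,
            if_pos (by omega), hj1]
          have : a.length - 1 - (a.length - 1) = 0 := by omega
          rw [this, hq0]
        · rw [if_neg (by omega), List.getD_eq_getElem _ _ (by simpa using hj), List.getElem_set,
            if_neg (by omega)]
          simp
  | succ m ih =>
      intro hm
      obtain ⟨ihlen, ihval⟩ := ih (by omega)
      rw [List.range_succ, List.foldl_append, List.foldl_cons, List.foldl_nil]
      have e1 : (a.length:Int) - 2 - (m:Int) + 1 = ((a.length - 1 - m : Nat) : Int) := by omega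
      have e2 : (a.length:Int) - 2 - (m:Int) = ((a.length - 2 - m : Nat) : Int) := by omega
      rw [e1, e2, PySem.List.pySetD_natCast, PySem.List.pyGetD_natCast, PySem.List.pyGetD_natCast]
      have hval : min ((((List.range m).foldl
          (fun (R : List Int) (k : Nat) => PySem.List.pySetD R ((a.length:Int) - 2 - (k:Int))
            (min (PySem.List.pyGetD R ((a.length:Int) - 2 - (k:Int) + 1) 0)
                 (PySem.List.pyGetD a ((a.length:Int) - 2 - (k:Int)) 0)))
          ((List.replicate a.length ((10:Int)^10)).set (a.length - 1) (a.getD (a.length - 1) 0)))).getD (a.length - 1 - m) 0)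
          (a.getD (a.length - 2 - m) 0)
          = (scanMin (a.getD (a.length - 1) 0) a.reverse).getD (m + 1) 0 := by
        rw [ihval (a.length - 1 - m) (by omega), if_pos (le_refl _)]
        have h3 : a.length - 1 - (a.length - 1 - m) = m := by omega
        rw [h3]
        rw [scanMin_getD_succ _ _ m (by simpa using (by omega : m + 1 < a.length))]
        have h4 : a.reverse.getD (m+1) 0 = a.getD (a.length - 2 - m) 0 := by
          rw [reverse_getD a (m+1) (by omega)]
          have : a.length - 1 - (m+1) = a.length - 2 - m := by omega
          rw [this]
        rw [h4]
      rw [hval]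
      constructor
      · simpa using ihlen
      · intro j hj
        rw [List.getD_eq_getElem _ _ (by rw [List.length_set, ihlen]; omega), List.getElem_set]
        by_cases hje : a.length - 2 - m = j
        · rw [if_pos hje, if_pos (by omega)]
          have : a.length - 1 - j = m + 1 := by omega
          rw [this]
        · rw [if_neg hje, ← List.getD_eq_getElem _ 0 (by rw [ihlen]; omega), ihval j hj]
          by_cases hjm : a.length - 1 - m ≤ j
          · rw [if_pos hjm, if_pos (by omega)]
          · rw [if_neg hjm, if_neg (by omega)]

theorem rightFold_getD (a : List Int) (ha : a ≠ []) (j : Nat) (hj : j < a.length) :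
    ((PySem.List.pyRange (PySem.List.len a - 2) (-1) (-1)).foldl
        (fun R i => PySem.List.pySetD R i (min (PySem.List.pyGetD R (i+1) 0) (PySem.List.pyGetD a i 0)))
        (PySem.List.pySetD (PySem.List.pyRepeat [(10:Int)^10] (PySem.List.len a)) (-1) (PySem.List.pyGetD a (-1) 0))).getD j 0
      = (scanMin (a.getD (a.length - 1) 0) a.reverse).getD (a.length - 1 - j) 0 := by
  have hn : 0 < a.length := List.length_pos_iff.mpr ha
  rw [PySem.List.len_eq, PySem.List.pyRange_neg_one]
  have ht : ((a.length : Int) - 2 - (-1)).toNat = a.length - 1 := by omega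
  rw [ht, List.foldl_map, PySem.List.pyRepeat_singleton, PySem.List.pyGetD_neg_one a 0 ha]
  simp only [Int.toNat_natCast]
  rw [pySetD_neg_one _ (by simp; omega) _]
  have hlast : a.getLast ha = a.getD (a.length - 1) 0 := by
    rw [List.getLast_eq_getElem, List.getD_eq_getElem _ _ (by omega)]
  have hlen : (List.replicate a.length ((10:Int)^10)).length = a.length := by simp
  rw [hlen, hlast]
  obtain ⟨_, hval⟩ := rightAux a ha (a.length - 1) (le_refl _)
  have h2 := hval j hj
  rw [if_pos (by omega)] at h2
  exact h2

-- prefix-record / suffix-record predicates on positions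
def pbB (a : List Int) (j : Nat) : Bool :=
  decide (a.getD j 0 ≤ (scanMin (a.getD 0 0) a).getD j 0)
def sbB (a : List Int) (j : Nat) : Bool :=
  decide (a.getD j 0 ≤ (scanMin (a.getD (a.length - 1) 0) a.reverse).getD (a.length - 1 - j) 0)

theorem A_count (a : List Int) (ha : a ≠ []) :
    solution a = ((List.range a.length).countP (fun j => pbB a j || sbB a j) : Int) := by
  have hn : 0 < a.length := List.length_pos_iff.mpr ha
  simp only [solution]
  rw [PySem.List.pyRange_zero]
  simp only [List.foldl_map]
  rw [count_if_fold']
  have ht : (PySem.List.len a).toNat = a.length := by simp [PySem.List.len_eq]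
  rw [ht, zero_add]
  congr 1
  apply List.countP_congr
  intro j hj
  have hjlt : j < a.length := List.mem_range.mp hj
  simp only [PySem.List.pyGetD_natCast]
  rw [leftFold_getD a ha j hjlt, rightFold_getD a ha j hjlt]
  simp only [pbB, sbB, Bool.not_eq_true', Bool.or_eq_true, decide_eq_true_iff,
    decide_eq_false_iff_not, not_and_or, not_lt]

theorem pre_count (a : List Int) :
    recordsB (PySem.List.pyGetD a 0 0) a = ((List.range a.length).countP (pbB a) : Int) := by
  rw [PySem.List.pyGetD_zero, records_eq_countP]
  rfl

theorem suf_count (a : List Int) (ha : a ≠ []) :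
    recordsB (PySem.List.pyGetD a (-1) 0) a.reverse = ((List.range a.length).countP (sbB a) : Int) := by
  have hn : 0 < a.length := List.length_pos_iff.mpr ha
  rw [PySem.List.pyGetD_neg_one a 0 ha, records_eq_countP]
  have hgl : a.getLast ha = a.getD (a.length - 1) 0 := by
    rw [List.getLast_eq_getElem, List.getD_eq_getElem _ _ (by omega)]
  have hlr : a.reverse.length = a.length := by simp
  rw [hlr, hgl]
  congr 1
  calc (List.range a.length).countP
        (fun j => decide (a.reverse.getD j 0 ≤ (scanMin (a.getD (a.length - 1) 0) a.reverse).getD j 0))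
      = (List.range a.length).countP (fun j => sbB a (a.length - 1 - j)) := by
        apply List.countP_congr
        intro j hj
        have hjlt : j < a.length := List.mem_range.mp hj
        rw [reverse_getD a j hjlt]
        simp only [sbB]
        have : a.length - 1 - (a.length - 1 - j) = j := by omega
        rw [this]
    _ = (List.range a.length).countP (sbB a) := countP_range_reflect a.length (sbB a)

theorem both_iff (a : List Int) (ha : a ≠ []) (m0 : Int) (hm : PySem.List.min? a (fun x => x) = some m0)
    (j : Nat) (hj : j < a.length) :
    (pbB a j && sbB a j) = (a.getD j 0 == m0) := by
  have hn : 0 < a.length := List.length_pos_iff.mpr ha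
  have hmem0 : m0 ∈ a := PySem.List.min?_mem hm
  have hmin : ∀ y ∈ a, m0 ≤ y := PySem.List.min?_isMin hm
  have haj : a.getD j 0 ∈ a := by
    rw [List.getD_eq_getElem _ _ hj]; exact List.getElem_mem hj
  have key : (a.getD j 0 ≤ (scanMin (a.getD 0 0) a).getD j 0 ∧
      a.getD j 0 ≤ (scanMin (a.getD (a.length - 1) 0) a.reverse).getD (a.length - 1 - j) 0)
      ↔ a.getD j 0 = m0 := by
    constructor
    · rintro ⟨h1, h2⟩
      have hle : ∀ y ∈ a, a.getD j 0 ≤ y := by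
        intro y hy
        obtain ⟨k, hk, rfl⟩ := List.mem_iff_getElem.mp hy
        rw [← List.getD_eq_getElem a 0 hk]
        by_cases hkj : k ≤ j
        · exact le_trans h1 (scanMin_getD_le_elem _ _ j k hkj hj)
        · have h5 : (scanMin (a.getD (a.length - 1) 0) a.reverse).getD (a.length - 1 - j) 0
              ≤ a.reverse.getD (a.length - 1 - k) 0 :=
            scanMin_getD_le_elem _ _ _ _ (by omega) (by simpa using (by omega : a.length - 1 - j < a.length))
          rw [reverse_getD a (a.length - 1 - k) (by omega)] at h5
          have he : a.length - 1 - (a.length - 1 - k) = k := by omega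
          rw [he] at h5
          exact le_trans h2 h5
      exact le_antisymm (hle m0 hmem0) (hmin _ haj)
    · intro h
      rw [h]
      constructor
      · rcases scanMin_getD_mem (a.getD 0 0) a j hj with h6 | h6
        · rw [h6]
          exact hmin _ (by rw [List.getD_eq_getElem _ _ hn]; exact List.getElem_mem hn)
        · exact hmin _ h6
      · rcases scanMin_getD_mem (a.getD (a.length - 1) 0) a.reverse (a.length - 1 - j)
            (by simpa using (by omega : a.length - 1 - j < a.length)) with h6 | h6
        · rw [h6]
          refine hmin _ ?_
          rw [List.getD_eq_getElem _ _ (by omega : a.length - 1 < a.length)]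
          exact List.getElem_mem _
        · exact hmin _ (List.mem_reverse.mp h6)
  simp only [pbB, sbB, ← Bool.decide_and]
  exact decide_eq_decide.mpr key

theorem mc_count (a : List Int) (ha : a ≠ []) (m0 : Int) (hm : PySem.List.min? a (fun x => x) = some m0) :
    (List.range a.length).countP (fun j => pbB a j && sbB a j) = PySem.List.count a m0 := by
  have hc : PySem.List.count a m0 = a.countP (fun x => x == m0) := by
    simp [PySem.List.count, List.count]
  rw [hc, ← countP_range_getD a (fun x => x == m0) 0]
  apply List.countP_congr
  intro j hj
  rw [both_iff a ha m0 hm j (List.mem_range.mp hj)]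

-- ===== VERDICT (by name: the statement is the Claim_ definition above) =====
theorem solution_spec : Claim_equal_solution := by
  intro a _ ha
  unfold Spec_solution
  obtain ⟨m0, hm⟩ : ∃ m0, PySem.List.min? a (fun x => x) = some m0 := by
    cases h : PySem.List.min? a (fun x => x) with
    | none => exact absurd ((PySem.List.min?_eq_none_iff a _).mp h) ha
    | some m => exact ⟨m, rfl⟩
  have hA := A_count a ha
  have hIE := countP_or_and (List.range a.length) (pbB a) (sbB a)
  have hmc := mc_count a ha m0 hm
  have hB : solution_alt a =
      ((List.range a.length).countP (pbB a) : Int) + ((List.range a.length).countP (sbB a) : Int)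
        - (PySem.List.count a m0 : Int) := by
    simp only [solution_alt, hm, Option.getD_some]
    rw [pre_count a, suf_count a ha]
  rw [hA, hB, ← hmc]
  omega
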